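-- pv_equiv track=rewrite | github.com/nyu-dl/dl4ir-query-reformulator | utils.py | idx2text
-- ===== SOURCE A (Python) =====
-- def idx2text(idxs, vocabinv, max_words=-1, char=False, output_unk=True):
--     '''
--     Convert list of vocabulary indexes to text.
--     '''
--     out = []
--     for i in idxs:
--         if i >= 0:
--             out.append(vocabinv[i])
--         elif i == -1:
--             if output_unk:
--                 out.append('<UNK>')
--         else:
--             break
--
--         if max_words > -1:
--             if len(out) >= max_words:
--                 break
--
--     if char:
--         return ''.join(out)
--     else:
--         return ' '.join(out)
-- ===== SOURCE B (Python) =====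
-- def idx2text(idxs, vocabinv, max_words=-1, char=False, output_unk=True):
--     '''
--     Convert list of vocabulary indexes to text.
--     '''
--     # Pass 1: compute only the cut position `stop` (no tokens are built here):
--     # stop at the first index < -1, or as soon as the word budget is spent.
--     stop = len(idxs)
--     taken = 0
--     for pos, i in enumerate(idxs):
--         if i < -1 or (max_words > -1 and taken == max_words):
--             stop = pos
--             break
--         if i >= 0 or output_unk:
--             taken += 1
--     # Pass 2: materialize the tokens from the prefix in one comprehension.
--     toks = [vocabinv[i] if i >= 0 else '<UNK>'
--             for i in idxs[:stop] if i >= 0 or output_unk]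
--     return ('' if char else ' ').join(toks)
-- ===== Notes on version B (the rewrite author's own statement) =====
-- stated objective: alternative
-- what changed: Replaces A's single accumulate-and-break loop by two staged passes: pass 1 scans the indices computing only an integer cut position (first sentinel < -1 or spent word budget), pass 2 builds the tokens from the sliced prefix in one filtering comprehension and joins them.
-- intended difference: When max_words == 0 and the first index yields a non-empty token (index >= 0 with a non-empty vocab entry, or -1 with output_unk), A still emits that one token because it truncates only after appending, while B returns '' — the intended result of asking for at most 0 words. — e.g. on idx2text([0], ["hi"], 0, false, true): A returns "hi", B returns ""
import Mathlib
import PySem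

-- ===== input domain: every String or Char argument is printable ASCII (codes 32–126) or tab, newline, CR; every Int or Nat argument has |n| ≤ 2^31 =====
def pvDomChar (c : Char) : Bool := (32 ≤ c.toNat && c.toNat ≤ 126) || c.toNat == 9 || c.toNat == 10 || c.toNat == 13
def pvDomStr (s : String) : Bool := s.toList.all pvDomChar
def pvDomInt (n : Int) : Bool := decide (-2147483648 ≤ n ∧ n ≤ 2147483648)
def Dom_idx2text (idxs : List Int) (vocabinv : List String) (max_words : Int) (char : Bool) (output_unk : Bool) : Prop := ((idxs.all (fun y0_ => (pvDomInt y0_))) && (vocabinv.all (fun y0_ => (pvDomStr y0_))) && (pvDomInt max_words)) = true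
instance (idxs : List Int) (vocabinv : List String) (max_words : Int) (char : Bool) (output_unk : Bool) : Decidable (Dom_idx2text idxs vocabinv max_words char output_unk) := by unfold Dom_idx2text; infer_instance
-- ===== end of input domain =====

-- B replaces A's accumulate-and-break loop by two staged passes: pass 1 scans only to
-- compute an integer cut position (sentinel or spent word budget), pass 2 builds the
-- tokens from the sliced prefix in one comprehension; objective: alternative decomposition.
-- Intended difference (D_): for max_words = 0 A still emits the first token; B emits none.


-- ===== PORT A =====
-- the for-loop of A: state is the accumulated `out`; branch order and the post-branch
-- max_words check are kept exactly as in the Python (vocabinv[i] via pyGet?; inside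
-- Pre_ every evaluated lookup succeeds, so the .getD "" default is never used)
def idx2textLoop (vocabinv : List String) (max_words : Int) (output_unk : Bool) : List Int → List String → List String
  | [], out => out
  | i :: rest, out =>
    if 0 ≤ i then
      let out' := out ++ [(PySem.List.pyGet? vocabinv i).getD ""]
      if max_words > -1 ∧ (out'.length : Int) ≥ max_words then out'
      else idx2textLoop vocabinv max_words output_unk rest out'
    else if i = -1 then
      let out' := if output_unk then out ++ ["<UNK>"] else out
      if max_words > -1 ∧ (out'.length : Int) ≥ max_words then out'
      else idx2textLoop vocabinv max_words output_unk rest out'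
    else out

def idx2text (idxs : List Int) (vocabinv : List String) (max_words : Int) (char : Bool) (output_unk : Bool) : String :=
  let out := idx2textLoop vocabinv max_words output_unk idxs []
  if char then PySem.Str.join "" out else PySem.Str.join " " out

-- ===== PORT B =====
-- Source B's pass 1: scan for the cut position, tracking only the count `taken` of tokens
-- the prefix would yield; returns the number of elements before the cut (the Python
-- tracks the position with enumerate and defaults to len(idxs); the recursion returns
-- the same number by counting the consumed elements)
def idx2textStop (output_unk : Bool) (max_words : Int) : List Int → Int → Nat
  | [], _ => 0
  | i :: rest, taken =>
    if i < -1 ∨ (max_words > -1 ∧ taken = max_words) then 0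
    else 1 + idx2textStop output_unk max_words rest (if 0 ≤ i ∨ output_unk then taken + 1 else taken)

-- Source B's comprehension body: kept element ↦ its token (vocabinv[i] only read when 0 ≤ i)
def idx2textTok (vocabinv : List String) (output_unk : Bool) (i : Int) : Option String :=
  if 0 ≤ i ∨ output_unk = true then
    some (if 0 ≤ i then (PySem.List.pyGet? vocabinv i).getD "" else "<UNK>")
  else none

def idx2text_alt (idxs : List Int) (vocabinv : List String) (max_words : Int) (char : Bool) (output_unk : Bool) : String :=
  let stop := idx2textStop output_unk max_words idxs 0
  -- idxs[:stop] with 0 ≤ stop ≤ len idxs is exactly List.take stop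
  let toks := (idxs.take stop).filterMap (idx2textTok vocabinv output_unk)
  PySem.Str.join (if char then "" else " ") toks

-- ===== PRECONDITION & SPEC =====
-- Pre_ holds exactly when A returns normally: it fails only if some position the loop
-- actually reaches (no earlier sentinel < -1, token budget not yet exhausted) holds a
-- non-negative index out of vocabinv's range, where A raises IndexError.
def Pre_idx2text (idxs : List Int) (vocabinv : List String) (max_words : Int) (char : Bool) (output_unk : Bool) : Prop :=
  ∀ j < idxs.length,
    ((∀ k < j, -1 ≤ idxs[k]!) ∧
     (max_words > -1 → j = 0 ∨
       (((idxs.take j).countP (fun i => decide (0 ≤ i) || (i == -1 && output_unk)) : Int) < max_words))) →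
    0 ≤ idxs[j]! → idxs[j]! < (vocabinv.length : Int)
instance (idxs : List Int) (vocabinv : List String) (max_words : Int) (char : Bool) (output_unk : Bool) : Decidable (Pre_idx2text idxs vocabinv max_words char output_unk) := by unfold Pre_idx2text; infer_instance

def pvWitness_idx2text : List Int × List String × Int × Bool × Bool := ([0, -1, 1], ["hi", "yo"], -1, false, true)

-- When max_words = 0 and the first index yields a non-empty token (-1 with output_unk, or
-- an in-range index whose vocab entry is non-empty), A returns that one token because it
-- truncates only after appending, while B returns "" — the intended result of asking for
-- at most 0 words.
def D_idx2text (idxs : List Int) (vocabinv : List String) (max_words : Int) (char : Bool) (output_unk : Bool) : Prop :=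
  let i0 := idxs.head?.getD (-2)
  max_words = 0 ∧ ((i0 = -1 ∧ output_unk = true) ∨ (0 ≤ i0 ∧ vocabinv[i0.toNat]?.getD "" ≠ ""))
instance (idxs : List Int) (vocabinv : List String) (max_words : Int) (char : Bool) (output_unk : Bool) : Decidable (D_idx2text idxs vocabinv max_words char output_unk) := by unfold D_idx2text; infer_instance

def Spec_idx2text (idxs : List Int) (vocabinv : List String) (max_words : Int) (char : Bool) (output_unk : Bool) (out : String) : Prop := ¬ D_idx2text idxs vocabinv max_words char output_unk → out = idx2text_alt idxs vocabinv max_words char output_unk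
instance (idxs : List Int) (vocabinv : List String) (max_words : Int) (char : Bool) (output_unk : Bool) (out : String) : Decidable (Spec_idx2text idxs vocabinv max_words char output_unk out) := by unfold Spec_idx2text; infer_instance

def pvDiffWitness_idx2text : List Int × List String × Int × Bool × Bool := ([0], ["hi"], 0, false, true)
def pvDiffWitnessOut_idx2text : String × String := ("hi", "")

-- ===== CLAIM (what is proved, stated in full; the proofs are below) =====
def Claim_unchanged_idx2text : Prop := ∀ (idxs : List Int) (vocabinv : List String) (max_words : Int) (char : Bool) (output_unk : Bool), Dom_idx2text idxs vocabinv max_words char output_unk → Pre_idx2text idxs vocabinv max_words char output_unk → Spec_idx2text idxs vocabinv max_words char output_unk (idx2text idxs vocabinv max_words char output_unk)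
def Claim_changed_idx2text : Prop := Dom_idx2text (pvDiffWitness_idx2text.1) (pvDiffWitness_idx2text.2.1) (pvDiffWitness_idx2text.2.2.1) (pvDiffWitness_idx2text.2.2.2.1) (pvDiffWitness_idx2text.2.2.2.2) ∧ Pre_idx2text (pvDiffWitness_idx2text.1) (pvDiffWitness_idx2text.2.1) (pvDiffWitness_idx2text.2.2.1) (pvDiffWitness_idx2text.2.2.2.1) (pvDiffWitness_idx2text.2.2.2.2) ∧ D_idx2text (pvDiffWitness_idx2text.1) (pvDiffWitness_idx2text.2.1) (pvDiffWitness_idx2text.2.2.1) (pvDiffWitness_idx2text.2.2.2.1) (pvDiffWitness_idx2text.2.2.2.2) ∧ idx2text (pvDiffWitness_idx2text.1) (pvDiffWitness_idx2text.2.1) (pvDiffWitness_idx2text.2.2.1) (pvDiffWitness_idx2text.2.2.2.1) (pvDiffWitness_idx2text.2.2.2.2) = pvDiffWitnessOut_idx2text.1 ∧ idx2text_alt (pvDiffWitness_idx2text.1) (pvDiffWitness_idx2text.2.1) (pvDiffWitness_idx2text.2.2.1) (pvDiffWitness_idx2text.2.2.2.1) (pvDiffWitness_idx2text.2.2.2.2)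 = pvDiffWitnessOut_idx2text.2 ∧ pvDiffWitnessOut_idx2text.1 ≠ pvDiffWitnessOut_idx2text.2
def Claim_exact_idx2text : Prop := ∀ (idxs : List Int) (vocabinv : List String) (max_words : Int) (char : Bool) (output_unk : Bool), Dom_idx2text idxs vocabinv max_words char output_unk → Pre_idx2text idxs vocabinv max_words char output_unk → D_idx2text idxs vocabinv max_words char output_unk → idx2text idxs vocabinv max_words char output_unk ≠ idx2text_alt idxs vocabinv max_words char output_unk

-- ===== LEMMAS AND PROOFS =====

-- the token list of the whole processed prefix (proof-side shorthand)
def pvToks (vocabinv : List String) (output_unk : Bool) (idxs : List Int) : List String :=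
  (idxs.takeWhile (fun i => decide (-1 ≤ i))).filterMap (idx2textTok vocabinv output_unk)

-- pass 1 with no budget cuts exactly at the first sentinel
theorem pvStop_no_limit (vocabinv : List String) (output_unk : Bool) (max_words : Int)
    (hmw : ¬ max_words > -1) :
    ∀ (idxs : List Int) (t : Int),
      (idxs.take (idx2textStop output_unk max_words idxs t)).filterMap (idx2textTok vocabinv output_unk)
        = pvToks vocabinv output_unk idxs := by
  intro idxs
  induction idxs with
  | nil => intro t; simp [idx2textStop, pvToks]
  | cons i rest ih =>
    intro t
    by_cases hs : i < -1
    · simp [idx2textStop, hs, pvToks, show ¬ (-1 ≤ i) by omega]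
    · have hcond : ¬ (i < -1 ∨ (max_words > -1 ∧ t = max_words)) := by tauto
      simp only [idx2textStop, if_neg hcond]
      have hw : -1 ≤ i := by omega
      simp only [show (1 : Nat) + idx2textStop output_unk max_words rest
          (if 0 ≤ i ∨ output_unk = true then t + 1 else t)
          = (idx2textStop output_unk max_words rest (if 0 ≤ i ∨ output_unk = true then t + 1 else t)) + 1
          from by omega, List.take_succ_cons, List.filterMap_cons]
      rw [ih]
      simp only [pvToks, List.takeWhile_cons, decide_eq_true_eq, if_pos hw, List.filterMap_cons]

-- pass 1 with budget: with t tokens already counted the prefix yields the next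
-- (max_words - t) tokens of the full token stream
theorem pvStop_limit (vocabinv : List String) (output_unk : Bool) (max_words : Int)
    (hmw : max_words > -1) :
    ∀ (idxs : List Int) (t : Int), 0 ≤ t → t ≤ max_words →
      (idxs.take (idx2textStop output_unk max_words idxs t)).filterMap (idx2textTok vocabinv output_unk)
        = (pvToks vocabinv output_unk idxs).take (max_words - t).toNat := by
  intro idxs
  induction idxs with
  | nil => intro t _ _; simp [idx2textStop, pvToks]
  | cons i rest ih =>
    intro t ht0 htm
    by_cases hs : i < -1
    · simp [idx2textStop, hs, pvToks, show ¬ (-1 ≤ i) by omega]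
    · by_cases heq : t = max_words
      · simp [idx2textStop, hs, heq, hmw, show (max_words - t).toNat = 0 by omega]
      · have hcond : ¬ (i < -1 ∨ (max_words > -1 ∧ t = max_words)) := by tauto
        simp only [idx2textStop, if_neg hcond]
        have hw : -1 ≤ i := by omega
        simp only [show (1 : Nat) + idx2textStop output_unk max_words rest
            (if 0 ≤ i ∨ output_unk = true then t + 1 else t)
            = (idx2textStop output_unk max_words rest (if 0 ≤ i ∨ output_unk = true then t + 1 else t)) + 1
            from by omega, List.take_succ_cons, List.filterMap_cons]
        by_cases hk : 0 ≤ i ∨ output_unk = true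
        · rw [if_pos hk, ih (t + 1) (by omega) (by omega)]
          have hnat : (max_words - t).toNat = (max_words - (t + 1)).toNat + 1 := by omega
          simp only [pvToks, List.takeWhile_cons, decide_eq_true_eq, if_pos hw,
            List.filterMap_cons, idx2textTok, if_pos hk, hnat, List.take_succ_cons]
        · rw [if_neg hk, ih t ht0 htm]
          simp only [pvToks, List.takeWhile_cons, decide_eq_true_eq, if_pos hw,
            List.filterMap_cons, idx2textTok, if_neg hk]

-- B in closed form: the full token stream, truncated to max_words when bounded
theorem pvAlt_eq (idxs : List Int) (vocabinv : List String) (max_words : Int) (char output_unk : Bool) :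
    idx2text_alt idxs vocabinv max_words char output_unk
      = PySem.Str.join (if char then "" else " ")
          (if max_words > -1 then (pvToks vocabinv output_unk idxs).take max_words.toNat
           else pvToks vocabinv output_unk idxs) := by
  simp only [idx2text_alt]
  by_cases hmw : max_words > -1
  · rw [if_pos hmw, pvStop_limit vocabinv output_unk max_words hmw idxs 0 le_rfl (by omega)]
    simp
  · rw [if_neg hmw, pvStop_no_limit vocabinv output_unk max_words hmw idxs 0]

theorem pvLoop_no_limit (vocabinv : List String) (max_words : Int) (output_unk : Bool)
    (hmw : ¬ max_words > -1) :
    ∀ (idxs : List Int) (out : List String),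
      idx2textLoop vocabinv max_words output_unk idxs out = out ++ pvToks vocabinv output_unk idxs := by
  intro idxs
  induction idxs with
  | nil => intro out; simp [idx2textLoop, pvToks]
  | cons i rest ih =>
    intro out
    by_cases h0 : 0 ≤ i
    · have hw : -1 ≤ i := by omega
      simp only [idx2textLoop, pvToks, List.takeWhile_cons, hw, if_pos h0, decide_true,
        idx2textTok]
      simp only [if_neg (by tauto : ¬ (max_words > -1 ∧ ((out ++ [(PySem.List.pyGet? vocabinv i).getD ""]).length : Int) ≥ max_words))]
      rw [ih]
      simp [pvToks, h0, idx2textTok]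
    · by_cases h1 : i = -1
      · subst h1
        simp only [idx2textLoop, if_neg h0]
        simp only [if_neg (by tauto : ¬ (max_words > -1 ∧ (((if output_unk then out ++ ["<UNK>"] else out)).length : Int) ≥ max_words))]
        rw [ih]
        cases output_unk <;>
          simp [pvToks, idx2textTok]
      · have hw : ¬ (-1 ≤ i) := by omega
        simp [idx2textLoop, h0, h1, pvToks, hw]

theorem pvLoop_limit (vocabinv : List String) (max_words : Int) (output_unk : Bool)
    (hmw : max_words > -1) :
    ∀ (idxs : List Int) (out : List String), (out.length : Int) < max_words →
      idx2textLoop vocabinv max_words output_unk idxs out =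
        out ++ (pvToks vocabinv output_unk idxs).take (max_words.toNat - out.length) := by
  intro idxs
  induction idxs with
  | nil => intro out _; simp [idx2textLoop, pvToks]
  | cons i rest ih =>
    intro out hout
    have hlt : out.length < max_words.toNat := by omega
    by_cases h0 : 0 ≤ i
    · have hw : -1 ≤ i := by omega
      simp only [idx2textLoop, if_pos h0]
      have htok : pvToks vocabinv output_unk (i :: rest)
          = (PySem.List.pyGet? vocabinv i).getD "" :: pvToks vocabinv output_unk rest := by
        simp [pvToks, hw, idx2textTok, h0]
      by_cases hstop : ((out ++ [(PySem.List.pyGet? vocabinv i).getD ""]).length : Int) ≥ max_words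
      · have : max_words.toNat - out.length = 1 := by
          simp at hstop; omega
        have hc : max_words > -1 ∧ ((out ++ [(PySem.List.pyGet? vocabinv i).getD ""]).length : Int) ≥ max_words := ⟨hmw, hstop⟩
        simp only [if_pos hc, htok, this, List.take_succ_cons, List.take_zero]
      · simp only [if_neg (by tauto : ¬ (max_words > -1 ∧ ((out ++ [(PySem.List.pyGet? vocabinv i).getD ""]).length : Int) ≥ max_words))]
        rw [ih _ (by simp at hstop ⊢; omega)]
        have h1 : max_words.toNat - out.length
            = (max_words.toNat - (out ++ [(PySem.List.pyGet? vocabinv i).getD ""]).length) + 1 := by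
          simp at hstop ⊢; omega
        simp [htok, h1]
    · by_cases h1 : i = -1
      · subst h1
        simp only [idx2textLoop, if_neg h0]
        cases output_unk with
        | false =>
          have htok : pvToks vocabinv false (-1 :: rest) = pvToks vocabinv false rest := by
            simp [pvToks, idx2textTok]
          simp only [if_neg (by simp; omega : ¬ (max_words > -1 ∧ (((if false = true then out ++ ["<UNK>"] else out) : List String).length : Int) ≥ max_words))]
          rw [show (if false = true then out ++ ["<UNK>"] else out) = out by simp]
          rw [ih _ hout, htok]
          simp
        | true =>
          have htok : pvToks vocabinv true (-1 :: rest) = "<UNK>" :: pvToks vocabinv true rest := by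
            simp [pvToks, idx2textTok]
          rw [show (if true = true then out ++ ["<UNK>"] else out) = out ++ ["<UNK>"] by simp]
          by_cases hstop : ((out ++ ["<UNK>"]).length : Int) ≥ max_words
          · have : max_words.toNat - out.length = 1 := by simp at hstop; omega
            have hc : max_words > -1 ∧ ((out ++ ["<UNK>"]).length : Int) ≥ max_words := ⟨hmw, hstop⟩
            simp only [if_pos hc, htok, this, List.take_succ_cons, List.take_zero]
            simp
          · simp only [if_neg (by tauto : ¬ (max_words > -1 ∧ ((out ++ ["<UNK>"]).length : Int) ≥ max_words))]
            rw [ih _ (by simp at hstop ⊢; omega)]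
            have h1 : max_words.toNat - out.length
                = (max_words.toNat - (out ++ ["<UNK>"]).length) + 1 := by simp at hstop ⊢; omega
            simp [htok, h1]
      · have hw : ¬ (-1 ≤ i) := by omega
        simp [idx2textLoop, h0, h1, pvToks, hw]

theorem pvPre_head (i : Int) (rest : List Int) (vocabinv : List String)
    (max_words : Int) (char output_unk : Bool)
    (hpre : Pre_idx2text (i :: rest) vocabinv max_words char output_unk) (h0 : 0 ≤ i) :
    i < (vocabinv.length : Int) := by
  have h := hpre 0 (by simp) ⟨by omega, fun _ => Or.inl rfl⟩ (by simpa using h0)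
  simpa using h

theorem pvJoin_singleton (sep s : String) : PySem.Str.join sep [s] = s := by
  simp [PySem.Str.join, PySem.Chars.join, List.intercalate, String.ofList]

theorem pvJoin_nil (sep : String) : PySem.Str.join sep [] = "" := rfl

theorem pvJoin_eq (char : Bool) (L : List String) :
    (if char then PySem.Str.join "" L else PySem.Str.join " " L)
      = PySem.Str.join (if char then "" else " ") L := by
  cases char <;> rfl

-- ===== VERDICT (by name: the statement is the Claim_ definition above) =====
theorem idx2text_spec : Claim_unchanged_idx2text := by
  intro idxs vocabinv max_words char output_unk _dom hpre hnd
  unfold idx2text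
  rw [pvAlt_eq]
  by_cases hmw : max_words > -1
  · by_cases hz : max_words = 0
    · subst hz
      -- max_words = 0: A processes exactly the first element, B takes no token
      simp only [if_pos hmw, Int.toNat_zero, List.take_zero]
      cases idxs with
      | nil => simp [idx2textLoop, pvJoin_eq]
      | cons i rest =>
        by_cases h0 : 0 ≤ i
        · have hlt : i < (vocabinv.length : Int) := pvPre_head i rest vocabinv 0 char output_unk hpre h0
          have hd : ¬ ((i = -1 ∧ output_unk = true) ∨ (0 ≤ i ∧ vocabinv[i.toNat]?.getD "" ≠ "")) := by
            simpa [D_idx2text] using hnd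
          have hgd : vocabinv[i.toNat]?.getD "" = "" := by tauto
          have hsome : vocabinv[i.toNat]? = some "" := by
            rw [List.getElem?_eq_getElem (by omega : i.toNat < vocabinv.length)] at hgd ⊢
            simpa using hgd
          have hget : PySem.List.pyGet? vocabinv i = some "" := by
            rw [PySem.List.pyGet?_of_nonneg _ h0, hsome]
          have hc : (0:Int) > -1 ∧ ((([] : List String) ++ [(some "").getD ""]).length : Int) ≥ 0 := ⟨hmw, by simp⟩
          simp only [idx2textLoop, if_pos h0, hget]
          rw [if_pos hc]
          cases char <;> simp [pvJoin_singleton, pvJoin_nil]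
        · by_cases h1 : i = -1
          · subst h1
            have hunk : output_unk = false := by
              have hd : ¬ (((-1 : Int) = -1 ∧ output_unk = true) ∨
                  (0 ≤ (-1 : Int) ∧ vocabinv[(-1 : Int).toNat]?.getD "" ≠ "")) := by
                simpa [D_idx2text] using hnd
              cases output_unk
              · rfl
              · exact absurd (Or.inl ⟨rfl, rfl⟩) hd
            subst hunk
            simp only [idx2textLoop, if_neg h0]
            rw [show (if false = true then ([] : List String) ++ ["<UNK>"] else []) = [] by simp]
            rw [if_pos (show (0:Int) > -1 ∧ (([] : List String).length : Int) ≥ 0 from ⟨hmw, by simp⟩)]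
            cases char <;> simp
          · simp only [idx2textLoop, if_neg h0, if_neg h1]
            exact pvJoin_eq char _
    · have hpos : (0 : Int) < max_words := by omega
      rw [pvLoop_limit vocabinv max_words output_unk hmw idxs [] (by simpa using hpos)]
      simp only [List.nil_append, List.length_nil, Nat.sub_zero, if_pos hmw]
      exact pvJoin_eq char _
  · rw [pvLoop_no_limit vocabinv max_words output_unk hmw idxs []]
    simp only [List.nil_append, if_neg hmw]
    exact pvJoin_eq char _

theorem idx2text_changed : Claim_changed_idx2text := by
  unfold Claim_changed_idx2text; decide

theorem idx2text_tight : Claim_exact_idx2text := by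
  intro idxs vocabinv max_words char output_unk _dom hpre hD
  simp only [D_idx2text] at hD
  obtain ⟨hz, hcase⟩ := hD
  subst hz
  rw [pvAlt_eq]
  cases idxs with
  | nil => simp at hcase
  | cons i rest =>
    simp only [List.head?_cons, Option.getD_some] at hcase
    rcases hcase with ⟨h1, hunk⟩ | ⟨h0, hne⟩
    · subst h1; subst hunk
      unfold idx2text
      cases char <;>
        simp [idx2textLoop, pvJoin_singleton, pvJoin_nil]
    · have h0' : 0 ≤ i := h0
      have hlt : i < (vocabinv.length : Int) := pvPre_head i rest vocabinv 0 char output_unk hpre h0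
      obtain ⟨s, hs⟩ : ∃ t, vocabinv[i.toNat]? = some t :=
        ⟨vocabinv[i.toNat]'(by omega), List.getElem?_eq_getElem (by omega)⟩
      have hget : PySem.List.pyGet? vocabinv i = some s := by
        rw [PySem.List.pyGet?_of_nonneg _ h0, hs]
      have hsne : s ≠ "" := by rw [hs] at hne; simpa using hne
      unfold idx2text
      cases char <;>
        simp [idx2textLoop, hget, h0, pvJoin_singleton, pvJoin_nil] <;>
        simpa using hsne
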